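-- pv_equiv track=rewrite | github.com/Aituns/FooBar | google.py | solution
-- ===== SOURCE A (Python) =====
-- def solution(s):
--     diameter = len(s)
--
--     for i in range(diameter):
--         slices = s.count(s[0:i])
--         if (s[0:i] * slices == s):
--             string = s[0:i]
--             if s[diameter - len(string):diameter] == s[0:i]:
--                 return slices
--     if s == '':
--         return 0
--     if s[0:i] * slices != s:
--         return 1
-- ===== SOURCE B (Python) =====
-- def solution(s):
--     # string-doubling trick: the smallest rotation period of s, found by one
--     # substring search, is the length of the smallest repeating prefix
--     if s == '':
--         return 0
--     return len(s) // (s + s).find(s, 1)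
-- ===== Notes on version B (the rewrite author's own statement) =====
-- stated objective: faster
-- what changed: B replaces A's loop over every prefix length (each with an O(n) count and two tiled-string comparisons) by the classic string-doubling trick: a single substring search (s+s).find(s,1) yields the smallest rotation period p, which is proved to divide n and tile s, so the answer is n//p.
import Mathlib
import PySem

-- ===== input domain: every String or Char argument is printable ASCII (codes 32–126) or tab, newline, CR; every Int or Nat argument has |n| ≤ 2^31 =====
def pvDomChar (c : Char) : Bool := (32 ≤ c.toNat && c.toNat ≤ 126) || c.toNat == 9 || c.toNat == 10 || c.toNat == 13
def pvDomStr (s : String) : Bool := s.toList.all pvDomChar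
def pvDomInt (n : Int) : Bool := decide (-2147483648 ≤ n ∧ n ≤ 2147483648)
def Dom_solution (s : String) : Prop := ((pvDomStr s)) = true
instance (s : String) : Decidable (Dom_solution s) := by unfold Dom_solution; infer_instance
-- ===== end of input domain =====

-- B replaces A's scan over prefix lengths by one substring search: (s+s).find(s,1) is the
-- smallest rotation period of s, which divides len(s) and tiles s, so the answer is len(s)//it.

-- ===== PORT A =====
-- the loop 'for i in range(diameter): slices = s.count(s[0:i]); …' with its two nested ifs and early return
def solutionLoopA (cs : List Char) (diameter : Nat) : List Int → Option Int
  | [] => none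
  | i :: rest =>
    let p := PySem.List.slice cs (some 0) (some i)
    let slices : Int := (PySem.Chars.count cs p : Int)
    if PySem.List.pyRepeat p slices = cs then
      if PySem.List.slice cs (some ((diameter : Int) - (p.length : Int))) (some (diameter : Int)) = p then
        some slices
      else solutionLoopA cs diameter rest
    else solutionLoopA cs diameter rest

def solution (s : String) : Int :=
  let cs := s.toList
  let diameter := cs.length
  match solutionLoopA cs diameter (PySem.List.pyRange 0 (diameter : Int) 1) with
  | some r => r
  | none =>
    if cs = [] then 0
    else
      -- leftover loop variables after a completed loop: i = diameter - 1, slices = s.count(s[0:i])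
      let i : Int := (diameter : Int) - 1
      let p := PySem.List.slice cs (some 0) (some i)
      let slices : Int := (PySem.Chars.count cs p : Int)
      if PySem.List.pyRepeat p slices ≠ cs then 1
      else 0  -- dead branch: Python falls off the end (None) here; proved unreachable below (fallback_ne)

-- ===== PORT B =====
-- 'if s == "": return 0' then 'return len(s) // (s + s).find(s, 1)'
def solution_alt (s : String) : Int :=
  let cs := s.toList
  if cs = [] then 0
  else PySem.Int.floordiv ((cs.length : Nat) : Int) (PySem.Chars.findFrom (cs ++ cs) cs 1 none)

-- ===== PRECONDITION & SPEC =====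
def Spec_solution (s : String) (out : Int) : Prop := out = solution_alt s
instance (s : String) (out : Int) : Decidable (Spec_solution s out) := by unfold Spec_solution; infer_instance

-- ===== CLAIM (what is proved, stated in full; the proofs are below) =====
def Claim_equal_solution : Prop := ∀ (s : String), Dom_solution s → Spec_solution s (solution s)

-- ===== LEMMAS AND PROOFS =====

-- 'd tiles cs exactly' — the condition A's loop body amounts to
def qB (cs : List Char) (n d : Nat) : Bool :=
  (n % d == 0) && (cs == (List.replicate (n / d) (cs.take d)).flatten)

-- first candidate in the list satisfying qB
def refFind (cs : List Char) (n : Nat) : List Nat → Option Nat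
  | [] => none
  | d :: rest => if qB cs n d then some d else refFind cs n rest

theorem refFind_eq_none_iff (cs : List Char) (n : Nat) (l : List Nat) :
    refFind cs n l = none ↔ ∀ d ∈ l, qB cs n d = false := by
  induction l with
  | nil => simp [refFind]
  | cons d rest ih =>
    by_cases h : qB cs n d = true <;> simp [refFind, h, ih]

theorem refFind_append (cs : List Char) (n : Nat) (l1 l2 : List Nat) :
    refFind cs n (l1 ++ l2) =
      match refFind cs n l1 with
      | some d => some d
      | none => refFind cs n l2 := by
  induction l1 with
  | nil => simp [refFind]
  | cons d rest ih =>
    by_cases h : qB cs n d = true <;> simp [refFind, h, ih]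

theorem length_flatten_replicate {α : Type} (k : Nat) (p : List α) :
    ((List.replicate k p).flatten).length = k * p.length := by
  induction k with
  | zero => simp
  | succ k ih => simp [List.replicate_succ, ih]; ring

theorem drop_flatten_replicate {α : Type} (p : List α) (j : Nat) :
    ∀ k, ((List.replicate k p).flatten).drop (j * p.length) = (List.replicate (k - j) p).flatten := by
  induction j with
  | zero => simp
  | succ j ih =>
    intro k
    cases k with
    | zero => simp
    | succ k =>
      have h : (j + 1) * p.length = p.length + j * p.length := by ring
      rw [h, List.replicate_succ, List.flatten_cons, ← List.drop_drop, List.drop_left, ih k]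
      simp [Nat.succ_sub_succ]

theorem last_block {α : Type} (p : List α) (k : Nat) (hk : 1 ≤ k) :
    (((List.replicate k p).flatten).drop (((List.replicate k p).flatten).length - p.length)).take
        (((List.replicate k p).flatten).length - (((List.replicate k p).flatten).length - p.length)) = p := by
  have hL := length_flatten_replicate k p
  have h2 : k * p.length - p.length = (k - 1) * p.length := by rw [Nat.sub_mul, one_mul]
  have h3 : k * p.length - (k - 1) * p.length = p.length := by
    rw [← Nat.sub_mul, show k - (k - 1) = 1 from by omega, one_mul]
  rw [hL, h2, drop_flatten_replicate, show k - (k - 1) = 1 from by omega, h3]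
  simp

-- Python's str.count scans greedily left to right: on a string that is exactly k tiles of p it finds exactly k
theorem count_go_flatten_replicate (p : List Char) (hp : p ≠ []) :
    ∀ (k fuel acc : Nat), k * p.length ≤ fuel →
      PySem.Chars.count.go p fuel ((List.replicate k p).flatten) acc = acc + k := by
  intro k
  induction k with
  | zero =>
    intro fuel acc _
    cases fuel <;> simp [PySem.Chars.count.go]
  | succ k ih =>
    intro fuel acc hf
    have hplen : 1 ≤ p.length := List.length_pos_iff.mpr hp
    have hfuel : 1 ≤ fuel := le_trans (by nlinarith) hf
    obtain ⟨f, rfl⟩ : ∃ f, fuel = f + 1 := ⟨fuel - 1, by omega⟩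
    obtain ⟨a, p', rfl⟩ := List.exists_cons_of_ne_nil hp
    rw [List.replicate_succ, List.flatten_cons, List.cons_append]
    rw [PySem.Chars.count.go]
    have hpre : (a :: p').isPrefixOf ((a :: p') ++ (List.replicate k (a :: p')).flatten) = true := by
      rw [List.isPrefixOf_iff_prefix]; exact List.prefix_append _ _
    rw [← List.cons_append, hpre]
    simp only [if_true]
    rw [List.drop_left]
    rw [ih f (acc + 1) (by nlinarith [hplen])]
    omega

theorem count_flatten_replicate (p : List Char) (hp : p ≠ []) (k : Nat) :
    PySem.Chars.count ((List.replicate k p).flatten) p = k := by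
  rw [PySem.Chars.count, if_neg (by simp [hp]), length_flatten_replicate,
    count_go_flatten_replicate p hp k _ 0 le_rfl]
  omega

theorem count_eq_of_qB (cs : List Char) (i : Nat) (hi1 : 1 ≤ i) (hi : i ≤ cs.length)
    (hq : qB cs cs.length i = true) :
    PySem.Chars.count cs (cs.take i) = cs.length / i := by
  simp only [qB, Bool.and_eq_true, beq_iff_eq] at hq
  obtain ⟨hmod, hrep⟩ := hq
  have hplen : (cs.take i).length = i := by simp [List.length_take]; omega
  have hp : cs.take i ≠ [] := by
    intro h; rw [h] at hplen; simp at hplen; omega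
  have h := count_flatten_replicate (cs.take i) hp (cs.length / i)
  rw [← hrep] at h
  exact h

-- the outer loop-body condition of A forces i to tile cs exactly
theorem outer_imp_qB (cs : List Char) (i : Nat) (hi1 : 1 ≤ i) (hi : i ≤ cs.length)
    (houter : PySem.List.pyRepeat (cs.take i) ((PySem.Chars.count cs (cs.take i) : Nat) : Int) = cs) :
    qB cs cs.length i = true := by
  have hplen : (cs.take i).length = i := by simp [List.length_take]; omega
  have hrep : (List.replicate (PySem.Chars.count cs (cs.take i)) (cs.take i)).flatten = cs := by
    simpa [PySem.List.pyRepeat] using houter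
  have hlen : (PySem.Chars.count cs (cs.take i)) * i = cs.length := by
    have := congrArg List.length hrep
    rwa [length_flatten_replicate, hplen] at this
  have hdvd : i ∣ cs.length := ⟨_, by rw [← hlen, Nat.mul_comm]⟩
  have hdiv : cs.length / i = PySem.Chars.count cs (cs.take i) := by
    rw [← hlen, Nat.mul_div_cancel _ hi1]
  simp only [qB, Bool.and_eq_true, beq_iff_eq]
  exact ⟨Nat.dvd_iff_mod_eq_zero.mp hdvd, by rw [hdiv]; exact hrep.symm⟩

-- A's loop-body condition at index i < n is exactly qB
theorem stepA_iff (cs : List Char) (hcs : cs ≠ []) (i : Nat) (hi : i < cs.length) :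
    (PySem.List.pyRepeat (cs.take i) ((PySem.Chars.count cs (cs.take i) : Nat) : Int) = cs ∧
      PySem.List.slice cs (some ((cs.length : Int) - (((cs.take i).length : Nat) : Int))) (some ((cs.length : Int))) = cs.take i)
      ↔ qB cs cs.length i = true := by
  have hn : 1 ≤ cs.length := List.length_pos_iff.mpr hcs
  have hplen : (cs.take i).length = i := by simp [List.length_take]; omega
  rcases Nat.eq_zero_or_pos i with hi0 | hi1
  · subst hi0
    simp only [List.take_zero]
    constructor
    · rintro ⟨houter, -⟩
      exact absurd houter.symm (by simp [PySem.List.pyRepeat, hcs])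
    · intro hq
      simp only [qB, Bool.and_eq_true, beq_iff_eq] at hq
      obtain ⟨hmod, -⟩ := hq
      omega
  · have hp : cs.take i ≠ [] := by
      intro h; rw [h] at hplen; simp at hplen; omega
    constructor
    · rintro ⟨houter, -⟩
      exact outer_imp_qB cs i hi1 (le_of_lt hi) houter
    · intro hq
      have hcount := count_eq_of_qB cs i hi1 (le_of_lt hi) hq
      simp only [qB, Bool.and_eq_true, beq_iff_eq] at hq
      obtain ⟨hmod, hrep⟩ := hq
      have hdvd : i ∣ cs.length := Nat.dvd_of_mod_eq_zero hmod
      have hk1 : 1 ≤ cs.length / i := Nat.div_pos (le_of_lt hi) hi1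
      constructor
      · rw [hcount]
        simpa [PySem.List.pyRepeat] using hrep.symm
      · rw [hplen]
        have hsub : (cs.length : Int) - (i : Int) = ((cs.length - i : Nat) : Int) := by omega
        rw [hsub, PySem.List.slice_natCast]
        have hlast := last_block (cs.take i) (cs.length / i) hk1
        rw [hplen] at hlast
        conv_lhs => rw [hrep]
        exact hlast

theorem qB_pos (cs : List Char) (hcs : cs ≠ []) (i : Nat) (hq : qB cs cs.length i = true) : 1 ≤ i := by
  rcases Nat.eq_zero_or_pos i with rfl | h
  · simp only [qB, Bool.and_eq_true, beq_iff_eq] at hq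
    have := List.length_pos_iff.mpr hcs
    omega
  · exact h

theorem qB_zero (cs : List Char) (hcs : cs ≠ []) : qB cs cs.length 0 = false := by
  have := List.length_pos_iff.mpr hcs
  simp [qB]
  omega

theorem qB_self (cs : List Char) (hcs : cs ≠ []) : qB cs cs.length cs.length = true := by
  simp [qB, Nat.div_self (List.length_pos_iff.mpr hcs)]

theorem loopA_eq_refFind (cs : List Char) (hcs : cs ≠ []) (l : List Nat)
    (hl : ∀ i ∈ l, i < cs.length) :
    solutionLoopA cs cs.length (List.map (fun (j : Nat) => (j : Int)) l) =
      (refFind cs cs.length l).map (fun d => ((cs.length / d : Nat) : Int)) := by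
  induction l with
  | nil => simp [solutionLoopA, refFind]
  | cons i rest ih =>
    have hi : i < cs.length := hl i (by simp)
    have hrest : ∀ j ∈ rest, j < cs.length := fun j hj => hl j (by simp [hj])
    have hslice : PySem.List.slice cs (some (0 : Int)) (some ((i : Nat) : Int)) = cs.take i := by
      simp [PySem.List.slice_to_natCast]
    simp only [List.map_cons, solutionLoopA, hslice]
    by_cases hq : qB cs cs.length i = true
    · obtain ⟨houter, hinner⟩ := (stepA_iff cs hcs i hi).mpr hq
      rw [if_pos houter, if_pos (by exact_mod_cast hinner), refFind, if_pos hq]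
      have := count_eq_of_qB cs i (qB_pos cs hcs i hq) (le_of_lt hi) hq
      simp [this]
    · rw [refFind, if_neg hq]
      have hnot := (not_iff_not.mpr (stepA_iff cs hcs i hi)).mpr hq
      push Not at hnot
      by_cases h1 : PySem.List.pyRepeat (cs.take i) ((PySem.Chars.count cs (cs.take i) : Nat) : Int) = cs
      · rw [if_pos h1, if_neg (by exact_mod_cast (hnot h1)), ih hrest]
      · rw [if_neg h1, ih hrest]

-- after a completed loop the leftover check 's[0:i] * slices != s' is always true (so Python never falls off the end)
theorem fallback_ne (cs : List Char) (hcs : cs ≠ [])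
    (hnone : refFind cs cs.length (List.range' 1 (cs.length - 1)) = none) :
    PySem.List.pyRepeat (PySem.List.slice cs (some 0) (some ((cs.length : Int) - 1)))
      ((PySem.Chars.count cs (PySem.List.slice cs (some 0) (some ((cs.length : Int) - 1))) : Nat) : Int) ≠ cs := by
  have hn : 1 ≤ cs.length := List.length_pos_iff.mpr hcs
  have hcast : (cs.length : Int) - 1 = ((cs.length - 1 : Nat) : Int) := by omega
  have hslice : PySem.List.slice cs (some (0 : Int)) (some ((cs.length : Int) - 1)) = cs.take (cs.length - 1) := by
    rw [hcast]; simp [PySem.List.slice_to_natCast]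
  rw [hslice]
  rcases Nat.eq_zero_or_pos (cs.length - 1) with h0 | h1
  · rw [h0]
    simp [PySem.List.pyRepeat, hcs]
  · intro houter
    have hq := outer_imp_qB cs (cs.length - 1) h1 (by omega) houter
    have := (refFind_eq_none_iff cs cs.length _).mp hnone (cs.length - 1)
      (by rw [List.mem_range'_1]; omega)
    rw [hq] at this
    simp at this

-- A (nonempty input) returns n/d for the FIRST d in 1..n that tiles cs (d = n always does)
theorem solution_eq_refFind (s : String) (hcs : s.toList ≠ []) :
    solution s = (((refFind s.toList s.toList.length (List.range' 1 s.toList.length)).map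
      (fun d => ((s.toList.length / d : Nat) : Int))).getD 0) := by
  have hn : 1 ≤ s.toList.length := List.length_pos_iff.mpr hcs
  unfold solution
  dsimp only
  have hrangeA : PySem.List.pyRange 0 ((s.toList.length : Nat) : Int) 1 =
      List.map (fun (j : Nat) => (j : Int)) (List.range s.toList.length) := by
    simp [PySem.List.pyRange_one]
  have hsplit0 : List.range s.toList.length = 0 :: List.range' 1 (s.toList.length - 1) := by
    obtain ⟨m, hm⟩ : ∃ m, s.toList.length = m + 1 := ⟨s.toList.length - 1, by omega⟩
    rw [hm, List.range_eq_range', List.range'_succ]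
    simp
  have hsplit1 : List.range' 1 s.toList.length =
      List.range' 1 (s.toList.length - 1) ++ [s.toList.length] := by
    obtain ⟨m, hm⟩ : ∃ m, s.toList.length = m + 1 := ⟨s.toList.length - 1, by omega⟩
    rw [hm, List.range'_concat]
    simp [Nat.add_comm]
  have hlA : ∀ i ∈ (0 :: List.range' 1 (s.toList.length - 1)), i < s.toList.length := by
    intro i hi
    rcases List.mem_cons.mp hi with rfl | hi'
    · omega
    · rw [List.mem_range'_1] at hi'; omega
  rw [hrangeA, hsplit0, loopA_eq_refFind s.toList hcs _ hlA]
  rw [show refFind s.toList s.toList.length (0 :: List.range' 1 (s.toList.length - 1)) =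
      refFind s.toList s.toList.length (List.range' 1 (s.toList.length - 1)) from by
    rw [refFind, qB_zero s.toList hcs]; simp]
  rw [hsplit1, refFind_append]
  cases h : refFind s.toList s.toList.length (List.range' 1 (s.toList.length - 1)) with
  | some d => simp
  | none =>
    simp only [Option.map_none]
    rw [refFind, if_pos (qB_self s.toList hcs)]
    rw [if_neg (by simpa using hcs), if_pos (fallback_ne s.toList hcs h)]
    simp only [Option.map_some, Option.getD_some]
    rw [Nat.div_self hn]
    simp

-- refFind over 1..m returns the least tiling length, with its witnesses
theorem refFind_range'_spec (cs : List Char) (n : Nat) :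
    ∀ (m d : Nat), refFind cs n (List.range' 1 m) = some d →
      qB cs n d = true ∧ 1 ≤ d ∧ d ≤ m ∧ ∀ e, 1 ≤ e → e < d → qB cs n e = false := by
  intro m
  induction m with
  | zero => intro d h; simp [refFind] at h
  | succ m ih =>
    intro d h
    rw [List.range'_concat, refFind_append] at h
    simp only [one_mul] at h
    cases h' : refFind cs n (List.range' 1 m) with
    | some d' =>
      rw [h'] at h
      have hdd : d' = d := by simpa using h
      subst hdd
      obtain ⟨h1, h2, h3, h4⟩ := ih d' h'
      exact ⟨h1, h2, by omega, h4⟩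
    | none =>
      rw [h'] at h
      simp only [refFind] at h
      by_cases hq : qB cs n (1 + m) = true
      · rw [if_pos hq] at h
        obtain rfl : 1 + m = d := by simpa using h
        refine ⟨hq, by omega, by omega, fun e he1 hed => ?_⟩
        exact (refFind_eq_none_iff cs n _).mp h' e (by rw [List.mem_range'_1]; omega)
      · rw [if_neg hq] at h
        simp at h
-- (note: `refFind [] = none` makes the last case impossible)

-- ---- rotation-period combinatorics for B ----

-- 'cs is a prefix of (cs++cs) dropped by p' is exactly 'rotating cs by p fixes it'
theorem prefix_drop_iff_rotate (cs : List Char) (p : Nat) (hp : p ≤ cs.length) :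
    cs <+: (cs ++ cs).drop p ↔ cs.rotate p = cs := by
  rw [List.drop_append_of_le_length hp, List.prefix_iff_eq_take, List.take_append,
    List.rotate_eq_drop_append_take hp]
  have h1 : (cs.drop p).take cs.length = cs.drop p := by
    apply List.take_of_length_le; simp
  have h2 : cs.length - (cs.drop p).length = p := by simp; omega
  rw [h1, h2]
  exact ⟨fun h => h.symm, fun h => h.symm⟩

theorem rotate_mul (cs : List Char) (p : Nat) (h : cs.rotate p = cs) (k : Nat) :
    cs.rotate (k * p) = cs := by
  induction k with
  | zero => simp
  | succ k ih =>
    have : (k + 1) * p = k * p + p := by ring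
    rw [this, ← List.rotate_rotate, ih, h]

theorem rotate_min_dvd (cs : List Char) (p : Nat) (hp1 : 1 ≤ p) (h : cs.rotate p = cs)
    (hmin : ∀ r, 1 ≤ r → r < p → cs.rotate r ≠ cs) : p ∣ cs.length := by
  have hmod : cs.rotate (cs.length % p) = cs := by
    have h1 : cs.rotate (cs.length / p * p + cs.length % p) = cs := by
      rw [Nat.mul_comm, Nat.div_add_mod]
      exact List.rotate_length cs
    rwa [← List.rotate_rotate, rotate_mul cs p h] at h1
  rcases Nat.eq_zero_or_pos (cs.length % p) with h0 | h1
  · exact Nat.dvd_of_mod_eq_zero h0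
  · exact absurd hmod (hmin _ h1 (Nat.mod_lt _ (by omega)))

-- every aligned block of a p-rotation-fixed list equals its first p characters
theorem block_of_rotate (cs : List Char) (p : Nat) (h : cs.rotate p = cs) (k : Nat)
    (hk : k * p + p ≤ cs.length) :
    (cs.drop (k * p)).take p = cs.take p := by
  have hrot : cs.rotate (k * p) = cs := rotate_mul cs p h k
  have hle : k * p ≤ cs.length := by omega
  rw [List.rotate_eq_drop_append_take hle] at hrot
  have := congrArg (List.take p) hrot
  rwa [List.take_append, show p - (cs.drop (k * p)).length = 0 from by simp; omega,
    List.take_zero, List.append_nil] at this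

-- a list whose aligned blocks all equal t is t tiled
theorem tile_of_blocks (t : List Char) (ht : t ≠ []) :
    ∀ (m : Nat) (l : List Char), l.length = m * t.length →
      (∀ k, k < m → (l.drop (k * t.length)).take t.length = t) →
      l = (List.replicate m t).flatten := by
  intro m
  induction m with
  | zero =>
    intro l hl _
    simp at hl
    simp [hl]
  | succ m ih =>
    intro l hl hblk
    have ht1 : 1 ≤ t.length := List.length_pos_iff.mpr ht
    have h0 : l.take t.length = t := by
      have := hblk 0 (by omega)
      simpa using this
    have hdrop : l.drop t.length = (List.replicate m t).flatten := by
      apply ih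
      · rw [List.length_drop, hl, Nat.add_mul, one_mul, Nat.add_sub_cancel]
      · intro k hk
        rw [List.drop_drop]
        rw [show t.length + k * t.length = (k + 1) * t.length from by ring]
        exact hblk (k + 1) (by omega)
    calc l = l.take t.length ++ l.drop t.length := (List.take_append_drop _ l).symm
      _ = t ++ (List.replicate m t).flatten := by rw [h0, hdrop]
      _ = (List.replicate (m + 1) t).flatten := by rw [List.replicate_succ, List.flatten_cons]

-- a tiling length is a rotation period
theorem rotate_of_qB (cs : List Char) (d : Nat) (hd1 : 1 ≤ d)
    (hd : d ≤ cs.length) (hq : qB cs cs.length d = true) : cs.rotate d = cs := by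
  simp only [qB, Bool.and_eq_true, beq_iff_eq] at hq
  obtain ⟨hmod, hrep⟩ := hq
  have htlen : (cs.take d).length = d := by simp [List.length_take]; omega
  have hk1 : 1 ≤ cs.length / d := Nat.div_pos hd hd1
  obtain ⟨k, hk⟩ : ∃ k, cs.length / d = k + 1 := ⟨cs.length / d - 1, by omega⟩
  rw [List.rotate_eq_drop_append_take hd]
  have hdropd : cs.drop d = (List.replicate k (cs.take d)).flatten := by
    conv_lhs => rw [hrep]
    have h1 := drop_flatten_replicate (cs.take d) 1 (k + 1)
    rw [one_mul, htlen] at h1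
    rw [hk, h1]
    simp
  rw [hdropd]
  conv_rhs => rw [hrep, hk]
  rw [List.replicate_succ', List.flatten_append]
  simp

-- the least rotation period divides n and tiles cs
theorem qB_of_rotate_min (cs : List Char) (p : Nat) (hp1 : 1 ≤ p)
    (hp : p ≤ cs.length) (h : cs.rotate p = cs)
    (hmin : ∀ r, 1 ≤ r → r < p → cs.rotate r ≠ cs) : qB cs cs.length p = true := by
  have hdvd : p ∣ cs.length := rotate_min_dvd cs p hp1 h hmin
  have htlen : (cs.take p).length = p := by simp [List.length_take]; omega
  have htile : cs = (List.replicate (cs.length / p) (cs.take p)).flatten := by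
    apply tile_of_blocks (cs.take p) (by intro h0; rw [h0] at htlen; simp at htlen; omega)
    · rw [htlen, Nat.div_mul_cancel hdvd]
    · intro k hk
      rw [htlen]
      apply block_of_rotate cs p h
      have hmul : (k + 1) * p ≤ cs.length / p * p := by
        exact Nat.mul_le_mul_right _ (by omega)
      rw [Nat.div_mul_cancel hdvd] at hmul
      calc k * p + p = (k + 1) * p := by ring
        _ ≤ cs.length := hmul
  simp only [qB, Bool.and_eq_true, beq_iff_eq]
  exact ⟨Nat.dvd_iff_mod_eq_zero.mp hdvd, htile⟩

-- ===== VERDICT (by name: the statement is the Claim_ definition above) =====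
theorem solution_spec : Claim_equal_solution := by
  unfold Claim_equal_solution
  intro s _
  unfold Spec_solution solution_alt
  dsimp only
  by_cases hcs : s.toList = []
  · rw [if_pos hcs]
    unfold solution
    simp [hcs, solutionLoopA]
  · rw [if_neg hcs]
    set cs := s.toList with hcsdef
    have hn : 1 ≤ cs.length := List.length_pos_iff.mpr hcs
    -- characterize B's find: its result is the least rotation period p ∈ [1, n]
    have hk2n : (1 : Nat) ≤ (cs ++ cs).length := by simp; omega
    have hinf : cs <:+: (cs ++ cs).drop 1 := by
      rw [List.drop_append_of_le_length hn]
      exact ⟨cs.drop 1, [], by simp⟩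
    rw [show (1 : Int) = ((1 : Nat) : Int) from by norm_num]
    have hne : PySem.Chars.findFrom (cs ++ cs) cs ((1 : Nat) : Int) none ≠ -1 := by
      intro habs
      rw [PySem.Chars.findFrom_natCast_eq_neg_one_iff (cs ++ cs) cs 1 hk2n] at habs
      exact habs hinf
    obtain ⟨hF1, hFpre, hFmin⟩ := PySem.Chars.findFrom_natCast_spec (cs ++ cs) cs 1 hk2n hne
    set F := PySem.Chars.findFrom (cs ++ cs) cs ((1 : Nat) : Int) none with hFdef
    have hF0 : (0 : Int) ≤ F := by exact_mod_cast le_trans (by norm_num) hF1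
    set p := F.toNat with hpdef
    have hp1 : 1 ≤ p := by omega
    have hprefn : cs <+: (cs ++ cs).drop cs.length := by
      rw [List.drop_append_of_le_length le_rfl]
      simp
    have hpn : p ≤ cs.length := by
      by_contra hgt
      exact hFmin cs.length hn (by omega) hprefn
    have hrotp : cs.rotate p = cs := (prefix_drop_iff_rotate cs p hpn).mp hFpre
    have hminrot : ∀ r, 1 ≤ r → r < p → cs.rotate r ≠ cs := by
      intro r hr1 hrp habs
      exact hFmin r hr1 hrp ((prefix_drop_iff_rotate cs r (by omega)).mpr habs)
    have hqp : qB cs cs.length p = true := qB_of_rotate_min cs p hp1 hpn hrotp hminrot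
    -- characterize A: the least tiling length d
    obtain ⟨d, hd⟩ : ∃ d, refFind cs cs.length (List.range' 1 cs.length) = some d := by
      cases h : refFind cs cs.length (List.range' 1 cs.length) with
      | some d => exact ⟨d, rfl⟩
      | none =>
        have := (refFind_eq_none_iff cs cs.length _).mp h cs.length
          (by rw [List.mem_range'_1]; omega)
        rw [qB_self cs hcs] at this
        simp at this
    obtain ⟨hqd, hd1, hdn, hdmin⟩ := refFind_range'_spec cs cs.length cs.length d hd
    -- d = p
    have hdp : d ≤ p := by
      by_contra hgt
      have := hdmin p hp1 (by omega)
      rw [hqp] at this; simp at this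
    have hpd : p ≤ d := by
      by_contra hgt
      have hrotd : cs.rotate d = cs := rotate_of_qB cs d hd1 hdn hqd
      exact hFmin d hd1 (by omega) ((prefix_drop_iff_rotate cs d hdn).mpr hrotd)
    have hdpeq : d = p := by omega
    -- assemble both sides
    rw [solution_eq_refFind s hcs, ← hcsdef, hd, hdpeq]
    have hFp : F = ((p : Nat) : Int) := by omega
    rw [hFp, PySem.Int.floordiv_natCast]
    simp
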